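-- pv_equiv track=rewrite | github.com/lauratonsi/pii-masker-pro | progetto_elaborazione/prepare_dataset.py | iter_templates
-- ===== SOURCE A (Python) =====
-- from typing import Iterable, Optional
--
-- def iter_templates(text: str) -> Iterable[str]:
--     """
--     Yields top-level {{...}} template strings using brace counting.
--     Designed for Wikivoyage listings which may span multiple lines.
--     """
--     i = 0
--     n = len(text)
--     while i < n - 1:
--         if text[i : i + 2] != "{{":
--             i += 1
--             continue
--         depth = 0
--         j = i
--         while j < n - 1:
--             if text[j : j + 2] == "{{":
--                 depth += 1
--                 j += 2
--                 continue
--             if text[j : j + 2] == "}}":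
--                 depth -= 1
--                 j += 2
--                 if depth == 0:
--                     yield text[i:j]
--                     i = j
--                     break
--                 continue
--             j += 1
--         else:
--             break
-- ===== SOURCE B (Python) =====
-- def iter_templates(text):
--     """
--     Two-phase re-implementation: first a single tokenizer pass collects the
--     positions of "{{" / "}}" tokens (same greedy 2-char window stepping),
--     then one fold over the token list with a persistent depth counter emits
--     the top-level templates.
--     """
--     tokens = []
--     p = 0
--     n = len(text)
--     while p < n - 1:
--         pair = text[p:p + 2]
--         if pair == "{{":
--             tokens.append((p, True))
--             p += 2
--         elif pair == "}}":
--             tokens.append((p, False))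
--             p += 2
--         else:
--             p += 1
--     depth = 0
--     start = 0
--     for pos, is_open in tokens:
--         if is_open:
--             if depth == 0:
--                 start = pos
--             depth += 1
--         elif depth > 0:
--             depth -= 1
--             if depth == 0:
--                 yield text[start:pos + 2]
-- ===== Notes on version B (the rewrite author's own statement) =====
-- stated objective: alternative
-- what changed: A's nested rescanning loops (an outer scan for a template opener, an inner brace-counting loop per template) are replaced by a two-phase design: one tokenizer pass collecting the positions of double-brace open/close tokens, then a single fold over the token list with one persistent depth counter that emits the top-level templates.
import Mathlib
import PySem

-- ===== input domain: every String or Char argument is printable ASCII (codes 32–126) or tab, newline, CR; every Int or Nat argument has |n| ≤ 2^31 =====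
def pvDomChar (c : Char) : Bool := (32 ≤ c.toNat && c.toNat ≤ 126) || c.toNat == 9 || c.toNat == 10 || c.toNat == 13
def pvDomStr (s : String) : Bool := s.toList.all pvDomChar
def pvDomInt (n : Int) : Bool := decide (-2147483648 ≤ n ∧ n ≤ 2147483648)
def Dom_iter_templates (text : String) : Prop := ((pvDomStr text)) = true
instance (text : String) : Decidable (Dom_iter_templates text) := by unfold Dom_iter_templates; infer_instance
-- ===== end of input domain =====

-- B replaces A's nested rescanning loops by a two-phase pass (tokenize the {{ / }} positions once,
-- then fold over the token list with one persistent depth counter); objective: alternative decomposition.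
-- Loop ports carry a fuel argument (n+1, enough since every iteration advances the index while it is < n-1).

-- ===== PORT A =====
-- Python s[a:b] for Nat bounds: clamped drop/take (exact; equals PySem.List.slice_natCast)
def pvSliceNN (cs : List Char) (a b : Nat) : List Char := (cs.drop a).take (b - a)

-- A's inner `while j < n - 1` loop: returns `some (yielded slice, new i)` at the yield/break,
-- `none` when the loop exhausts (Python's `else: break` ends the generator).
def iterInnerA (cs : List Char) (n i : Nat) : Nat → Int → Nat → Option (List Char × Nat)
  | 0, _, _ => none
  | fuel + 1, depth, j =>
    if j < n - 1 then
      if pvSliceNN cs j (j + 2) = ['{', '{'] then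
        iterInnerA cs n i fuel (depth + 1) (j + 2)
      else if pvSliceNN cs j (j + 2) = ['}', '}'] then
        if depth - 1 = 0 then some (pvSliceNN cs i (j + 2), j + 2)
        else iterInnerA cs n i fuel (depth - 1) (j + 2)
      else iterInnerA cs n i fuel depth (j + 1)
    else none

-- A's outer `while i < n - 1` loop
def iterOuterA (cs : List Char) (n : Nat) : Nat → Nat → List (List Char)
  | 0, _ => []
  | fuel + 1, i =>
    if i < n - 1 then
      if pvSliceNN cs i (i + 2) = ['{', '{'] then
        match iterInnerA cs n i (n + 1) 0 i with
        | some (s, j') => s :: iterOuterA cs n fuel j'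
        | none => []
      else iterOuterA cs n fuel (i + 1)
    else []

def iter_templates (text : String) : List String :=
  (iterOuterA text.toList text.toList.length (text.toList.length + 1) 0).map String.ofList

-- ===== PORT B =====
-- phase 1 of Source B: one tokenizer pass collecting (position, is_open) tokens
def iterTokB (cs : List Char) (n : Nat) : Nat → Nat → List (Nat × Bool)
  | 0, _ => []
  | fuel + 1, p =>
    if p < n - 1 then
      if pvSliceNN cs p (p + 2) = ['{', '{'] then (p, true) :: iterTokB cs n fuel (p + 2)
      else if pvSliceNN cs p (p + 2) = ['}', '}'] then (p, false) :: iterTokB cs n fuel (p + 2)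
      else iterTokB cs n fuel (p + 1)
    else []

-- phase 2 of Source B: fold over the token list with a persistent depth counter
def iterEmitB (cs : List Char) (toks : List (Nat × Bool)) (depth : Int) (start : Nat) :
    List (List Char) :=
  match toks with
  | [] => []
  | (pos, isOpen) :: rest =>
    if isOpen then
      iterEmitB cs rest (depth + 1) (if depth = 0 then pos else start)
    else if 0 < depth then
      if depth - 1 = 0 then pvSliceNN cs start (pos + 2) :: iterEmitB cs rest (depth - 1) start
      else iterEmitB cs rest (depth - 1) start
    else iterEmitB cs rest depth start

def iter_templates_alt (text : String) : List String :=
  (iterEmitB text.toList (iterTokB text.toList text.toList.length (text.toList.length + 1) 0) 0 0).map String.ofList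

-- ===== PRECONDITION & SPEC =====
def Spec_iter_templates (text : String) (out : List String) : Prop := out = iter_templates_alt text
instance (text : String) (out : List String) : Decidable (Spec_iter_templates text out) := by unfold Spec_iter_templates; infer_instance

-- ===== CLAIM (what is proved, stated in full; the proofs are below) =====
def Claim_equal_iter_templates : Prop := ∀ (text : String), Dom_iter_templates text → Spec_iter_templates text (iter_templates text)

-- ===== LEMMAS AND PROOFS =====

theorem iterTokB_nil (cs : List Char) (n p : Nat) (h : ¬ p < n - 1) :
    ∀ f, iterTokB cs n f p = [] := by
  intro f; cases f with
  | zero => rfl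
  | succ f => rw [iterTokB, if_neg h]

theorem iterOuterA_nil (cs : List Char) (n i : Nat) (h : ¬ i < n - 1) :
    ∀ f, iterOuterA cs n f i = [] := by
  intro f; cases f with
  | zero => rfl
  | succ f => rw [iterOuterA, if_neg h]

-- with enough fuel the tokenizer's output does not depend on the fuel
theorem iterTokB_fuel (cs : List Char) (n : Nat) :
    ∀ f g p, n - 1 ≤ p + f → n - 1 ≤ p + g → iterTokB cs n f p = iterTokB cs n g p := by
  intro f
  induction f with
  | zero =>
      intro g p hf hg
      rw [iterTokB_nil cs n p (by omega) 0, iterTokB_nil cs n p (by omega) g]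
  | succ f ih =>
      intro g p hf hg
      by_cases h1 : p < n - 1
      · obtain ⟨g', rfl⟩ : ∃ g', g = g' + 1 := ⟨g - 1, by omega⟩
        rw [iterTokB, iterTokB, if_pos h1, if_pos h1]
        by_cases h2 : pvSliceNN cs p (p + 2) = ['{', '{']
        · rw [if_pos h2, if_pos h2, ih g' (p + 2) (by omega) (by omega)]
        · by_cases h3 : pvSliceNN cs p (p + 2) = ['}', '}']
          · rw [if_neg h2, if_neg h2, if_pos h3, if_pos h3, ih g' (p + 2) (by omega) (by omega)]
          · rw [if_neg h2, if_neg h2, if_neg h3, if_neg h3, ih g' (p + 1) (by omega) (by omega)]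
      · rw [iterTokB_nil cs n p h1, iterTokB_nil cs n p h1]

-- the inner loop only moves forward
theorem iterInnerA_lt (cs : List Char) (n i : Nat) :
    ∀ f (depth : Int) (j : Nat) (s : List Char) (j' : Nat),
      iterInnerA cs n i f depth j = some (s, j') → j < j' := by
  intro f
  induction f with
  | zero => intro depth j s j' h; exact absurd h (by simp [iterInnerA])
  | succ f ih =>
      intro depth j s j' h
      rw [iterInnerA] at h
      by_cases h1 : j < n - 1
      · rw [if_pos h1] at h
        by_cases h2 : pvSliceNN cs j (j + 2) = ['{', '{']
        · rw [if_pos h2] at h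
          exact lt_trans (by omega) (ih _ _ _ _ h)
        · rw [if_neg h2] at h
          by_cases h3 : pvSliceNN cs j (j + 2) = ['}', '}']
          · rw [if_pos h3] at h
            by_cases h4 : depth - 1 = 0
            · rw [if_pos h4] at h
              simp only [Option.some.injEq, Prod.mk.injEq] at h
              omega
            · rw [if_neg h4] at h
              exact lt_trans (by omega) (ih _ _ _ _ h)
          · rw [if_neg h3] at h
            exact lt_trans (by omega) (ih _ _ _ _ h)
      · rw [if_neg h1] at h
        exact absurd h (by simp)

-- while A's inner loop is running (depth ≥ 1), B's fold over the tokens from j mirrors it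
-- step for step: it emits the same yielded slice (if any) and then continues at depth 0
theorem inner_emit (cs : List Char) (n i : Nat) :
    ∀ f (j : Nat) (d : Int), 1 ≤ d → n - 1 ≤ j + f →
      iterEmitB cs (iterTokB cs n f j) d i =
        (match iterInnerA cs n i f d j with
         | some (s, j') => s :: iterEmitB cs (iterTokB cs n (n + 1) j') 0 i
         | none => []) := by
  intro f
  induction f with
  | zero =>
      intro j d hd hf
      rw [iterTokB_nil cs n j (by omega) 0]
      rfl
  | succ f ih =>
      intro j d hd hf
      by_cases h1 : j < n - 1
      · rw [iterTokB, if_pos h1]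
        conv_rhs => rw [iterInnerA, if_pos h1]
        by_cases h2 : pvSliceNN cs j (j + 2) = ['{', '{']
        · rw [if_pos h2, iterEmitB]
          conv_rhs => rw [if_pos h2]
          have hne : ¬ d = 0 := by omega
          simp only [if_true, if_neg hne]
          exact ih (j + 2) (d + 1) (by omega) (by omega)
        · by_cases h3 : pvSliceNN cs j (j + 2) = ['}', '}']
          · rw [if_neg h2, if_pos h3, iterEmitB]
            conv_rhs => rw [if_neg h2, if_pos h3]
            by_cases h4 : d - 1 = 0
            · conv_rhs => rw [if_pos h4]
              simp only [Bool.false_eq_true, if_false, if_pos (show (0:Int) < d by omega), h4]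
              rw [iterTokB_fuel cs n f (n + 1) (j + 2) (by omega) (by omega), if_pos trivial]
            · conv_rhs => rw [if_neg h4]
              simp only [Bool.false_eq_true, if_false, if_pos (show (0:Int) < d by omega),
                if_neg h4]
              exact ih (j + 2) (d - 1) (by omega) (by omega)
          · rw [if_neg h2, if_neg h3]
            conv_rhs => rw [if_neg h2, if_neg h3]
            exact ih (j + 1) d hd (by omega)
      · rw [iterTokB_nil cs n j h1]
        conv_rhs => rw [iterInnerA, if_neg h1]
        rfl

-- a "}}" step of the tokenizer cannot jump over the start of a "{{"
theorem slice_close_next (cs : List Char) (i : Nat)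
    (h : pvSliceNN cs i (i + 2) = ['}', '}']) :
    ¬ pvSliceNN cs (i + 1) (i + 1 + 2) = ['{', '{'] := by
  unfold pvSliceNN at *
  have hdrop : cs.drop (i + 1) = (cs.drop i).drop 1 := by
    rw [← List.drop_drop]
  rcases hcs : cs.drop i with _ | ⟨a, _ | ⟨b, t⟩⟩ <;>
    simp [hcs, hdrop] at h ⊢ <;> simp_all

theorem outer_emit (cs : List Char) (n : Nat) :
    ∀ f i s, n - 1 ≤ i + f → iterEmitB cs (iterTokB cs n (n + 1) i) 0 s = iterOuterA cs n f i := by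
  intro f
  induction f using Nat.strong_induction_on with
  | _ f ihs =>
    intro i s hf
    by_cases h1 : i < n - 1
    · obtain ⟨f', rfl⟩ : ∃ f', f = f' + 1 := ⟨f - 1, by omega⟩
      by_cases hop : pvSliceNN cs i (i + 2) = ['{', '{']
      · -- A enters the inner loop; its first step matches "{{" so depth becomes 1
        rw [show n + 1 = n.succ from rfl, iterTokB, if_pos h1, if_pos hop, iterEmitB]
        have hstep : iterInnerA cs n i (n + 1) 0 i = iterInnerA cs n i n 1 (i + 2) := by
          rw [show n + 1 = n.succ from rfl, iterInnerA, if_pos h1, if_pos hop]; norm_num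
        simp only [if_true, show ((0:Int) + 1) = 1 by norm_num]
        rw [inner_emit cs n i n (i + 2) 1 (by omega) (by omega), ← hstep,
          iterOuterA, if_pos h1, if_pos hop]
        rcases hin : iterInnerA cs n i (n + 1) 0 i with _ | ⟨s', j'⟩
        · rfl
        · have hlt : i < j' := by
            have := iterInnerA_lt cs n i n 1 (i + 2) s' j' (by rw [← hstep]; exact hin)
            omega
          simp only [List.cons.injEq]
          exact ⟨trivial, ihs f' (by omega) j' i (by omega)⟩
      · by_cases hcl : pvSliceNN cs i (i + 2) = ['}', '}']
        · -- tokenizer steps +2 over "}}"; A steps +1 and then +1 again (next char is '}')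
          rw [show n + 1 = n.succ from rfl, iterTokB, if_pos h1, if_neg hop, if_pos hcl, iterEmitB]
          simp only [Bool.false_eq_true, if_false, if_neg (by omega : ¬ (0:Int) < 0)]
          rw [iterOuterA, if_pos h1, if_neg hop]
          by_cases h2 : i + 1 < n - 1
          · obtain ⟨f'', rfl⟩ : ∃ f'', f' = f'' + 1 := ⟨f' - 1, by omega⟩
            rw [iterOuterA, if_pos h2, if_neg (slice_close_next cs i hcl)]
            rw [iterTokB_fuel cs n n (n + 1) (i + 2) (by omega) (by omega)]
            exact ihs f'' (by omega) (i + 2) s (by omega)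
          · rw [iterTokB_nil cs n (i + 2) (by omega) n, iterEmitB,
              iterOuterA_nil cs n (i + 1) h2 f']
        · rw [show n + 1 = n.succ from rfl, iterTokB, if_pos h1, if_neg hop, if_neg hcl,
            iterOuterA, if_pos h1, if_neg hop,
            iterTokB_fuel cs n n (n + 1) (i + 1) (by omega) (by omega)]
          exact ihs f' (by omega) (i + 1) s (by omega)
    · rw [iterTokB_nil cs n i h1, iterEmitB, iterOuterA_nil cs n i h1]

-- ===== VERDICT (by name: the statement is the Claim_ definition above) =====
theorem iter_templates_spec : Claim_equal_iter_templates := by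
  intro text _
  unfold Spec_iter_templates iter_templates iter_templates_alt
  rw [outer_emit text.toList text.toList.length (text.toList.length + 1) 0 0 (by omega)]
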